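-- pv_equiv track=rewrite | github.com/RomanRizers/tag_normalization_rules | first_implementation.py | split_composite_tag
-- ===== SOURCE A (Python) =====
-- def normalize_tag(tag: str) -> str:
--     """Приводит тег к стандартному формату с нижним регистром."""
--     return tag.replace(" ", "_").replace("-", "_").lower()
--
-- def split_composite_tag(tag: str, allowed_tags: dict) -> list:
--     """Разделяет составные теги на отдельные части, если это возможно.
--
--     Аргументы:
--         tag (str): Составной тег для разделения.
--         allowed_tags (dict): Словарь допустимых тегов.
--
--     Возвращает:
--         list: Список нормализованных тегов или пустой список, если разбиение невозможно.
--     """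
--     parts = []
--     current_part = ""
--     for char in tag:
--         if char.isupper() and current_part:
--             parts.append(current_part)
--             current_part = char
--         else:
--             current_part += char
--     if current_part:
--         parts.append(current_part)
--     # Проверяем части на соответствие разрешённым тегам
--     return [allowed_tags[normalize_tag(part)] for part in parts if normalize_tag(part) in allowed_tags]
-- ===== SOURCE B (Python) =====
-- def normalize_tag(tag: str) -> str:
--     return tag.replace(" ", "_").replace("-", "_").lower()
--
-- def split_composite_tag(tag: str, allowed_tags: dict) -> list:
--     # Two-pointer scan: slice the tag at each uppercase boundary instead of
--     # accumulating characters one by one, then map parts through a single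
--     # dict .get() lookup each.
--     parts = []
--     i, n = 0, len(tag)
--     while i < n:
--         j = i + 1
--         while j < n and not tag[j].isupper():
--             j += 1
--         parts.append(tag[i:j])
--         i = j
--     result = []
--     for part in parts:
--         value = allowed_tags.get(normalize_tag(part))
--         if value is not None:
--             result.append(value)
--     return result
-- ===== Notes on version B (the rewrite author's own statement) =====
-- stated objective: idiomatic
-- what changed: Replaces the character-accumulator loop with a two-pointer scan that slices the tag at uppercase boundaries, and replaces the membership-test-plus-index comprehension (which normalizes each part twice) with a single dict.get lookup per part.
import Mathlib
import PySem

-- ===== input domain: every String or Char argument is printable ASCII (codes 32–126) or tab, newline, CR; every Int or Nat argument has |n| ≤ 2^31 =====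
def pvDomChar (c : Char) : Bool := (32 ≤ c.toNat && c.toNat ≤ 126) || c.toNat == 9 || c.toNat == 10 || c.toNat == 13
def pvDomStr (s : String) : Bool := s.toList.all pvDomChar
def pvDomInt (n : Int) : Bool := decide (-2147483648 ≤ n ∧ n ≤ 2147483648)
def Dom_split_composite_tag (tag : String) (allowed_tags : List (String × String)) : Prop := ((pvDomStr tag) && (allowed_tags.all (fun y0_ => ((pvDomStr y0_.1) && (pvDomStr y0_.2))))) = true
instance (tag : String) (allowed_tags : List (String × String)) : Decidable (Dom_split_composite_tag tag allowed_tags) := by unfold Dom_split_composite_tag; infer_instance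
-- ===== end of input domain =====

-- B replaces A's character-accumulator loop by a boundary scan (span at each
-- uppercase character) and the membership-then-index comprehension by one
-- dict-get lookup per part; same result, different structure (objective: idiomatic).

-- normalize_tag, a module helper used by both versions
def normalizeTag (s : String) : String :=
  PySem.Str.lower (PySem.Str.replace (PySem.Str.replace s " " "_") "-" "_")

-- ===== PORT A =====
-- the 'for char in tag' loop with state (parts, current_part)
def pvLoopA : List Char → List (List Char) → List Char → List (List Char)
  | [], parts, cur => if cur ≠ [] then parts ++ [cur] else parts
  | c :: cs, parts, cur =>
      if PySem.Chars.isupper c && cur ≠ [] then pvLoopA cs (parts ++ [cur]) [c]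
      else pvLoopA cs parts (cur ++ [c])

def split_composite_tag (tag : String) (allowed_tags : List (String × String)) : List String :=
  let parts := pvLoopA tag.toList [] []
  -- [allowed_tags[normalize_tag(part)] for part in parts if normalize_tag(part) in allowed_tags]
  ((parts.filter (fun p => ((PySem.Dict.mk allowed_tags).get? (normalizeTag (String.ofList p))).isSome)).map
    (fun p => ((PySem.Dict.mk allowed_tags).get? (normalizeTag (String.ofList p))).getD ""))

-- ===== PORT B =====
-- the two-pointer scan: each part is a char followed by the run of non-uppercase chars
def pvPartsB : List Char → List (List Char)
  | [] => []
  | c :: rest =>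
      (c :: rest.takeWhile (fun d => !PySem.Chars.isupper d)) ::
        pvPartsB (rest.dropWhile (fun d => !PySem.Chars.isupper d))
termination_by cs => cs.length
decreasing_by
  simpa using Nat.lt_succ_of_le (List.length_dropWhile_le _ _)

def split_composite_tag_alt (tag : String) (allowed_tags : List (String × String)) : List String :=
  (pvPartsB tag.toList).filterMap
    (fun p => (PySem.Dict.mk allowed_tags).get? (normalizeTag (String.ofList p)))

-- ===== PRECONDITION & SPEC =====
def Spec_split_composite_tag (tag : String) (allowed_tags : List (String × String)) (out : List String) : Prop := out = split_composite_tag_alt tag allowed_tags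
instance (tag : String) (allowed_tags : List (String × String)) (out : List String) : Decidable (Spec_split_composite_tag tag allowed_tags out) := by unfold Spec_split_composite_tag; infer_instance

-- ===== CLAIM (what is proved, stated in full; the proofs are below) =====
def Claim_equal_split_composite_tag : Prop := ∀ (tag : String) (allowed_tags : List (String × String)), Dom_split_composite_tag tag allowed_tags → Spec_split_composite_tag tag allowed_tags (split_composite_tag tag allowed_tags)

-- ===== LEMMAS AND PROOFS =====

-- the accumulated 'parts' prefix factors out of the loop
theorem pvLoopA_factor (cs : List Char) (parts : List (List Char)) (cur : List Char) :
    pvLoopA cs parts cur = parts ++ pvLoopA cs [] cur := by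
  induction cs generalizing parts cur with
  | nil => simp [pvLoopA]; split <;> simp
  | cons c cs ih =>
      simp only [pvLoopA]
      split
      · rw [ih (parts ++ [cur]) [c], ih ([] ++ [cur]) [c]]; simp
      · rw [ih parts, ih []]

-- with a nonempty current part, the loop produces the span decomposition
theorem pvLoopA_span (cs : List Char) (cur : List Char) (h : cur ≠ []) :
    pvLoopA cs [] cur =
      (cur ++ cs.takeWhile (fun d => !PySem.Chars.isupper d)) ::
        pvPartsB (cs.dropWhile (fun d => !PySem.Chars.isupper d)) := by
  induction cs generalizing cur with
  | nil => simp [pvLoopA, pvPartsB, h]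
  | cons c cs ih =>
      simp only [pvLoopA]
      by_cases hu : PySem.Chars.isupper c
      · simp only [hu, h, ne_eq, not_false_iff, Bool.true_and, decide_true, if_true,
          List.takeWhile_cons, List.dropWhile_cons, Bool.not_true, Bool.false_eq_true,
          if_false]
        rw [pvLoopA_factor, ih [c] (by simp)]
        simp [pvPartsB]
      · simp only [hu, Bool.false_and, Bool.false_eq_true, if_false, List.takeWhile_cons,
          List.dropWhile_cons, Bool.not_false, if_true]
        rw [ih (cur ++ [c]) (by simp)]
        simp

theorem pvLoopA_eq_pvPartsB (cs : List Char) : pvLoopA cs [] [] = pvPartsB cs := by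
  cases cs with
  | nil => simp [pvLoopA, pvPartsB]
  | cons c cs =>
      have h1 : pvLoopA (c :: cs) [] [] = pvLoopA cs [] [c] := by simp [pvLoopA]
      rw [h1, pvLoopA_span cs [c] (by simp), pvPartsB]
      simp

-- filter-isSome then map-index equals filterMap of the lookup
theorem filter_map_eq_filterMap {α β : Type} (g : α → Option β) (dflt : β) (ps : List α) :
    (ps.filter (fun p => (g p).isSome)).map (fun p => (g p).getD dflt) = ps.filterMap g := by
  induction ps with
  | nil => rfl
  | cons p ps ih =>
      cases hg : g p <;> simp [hg, ih]

-- ===== VERDICT (by name: the statement is the Claim_ definition above) =====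
theorem split_composite_tag_spec : Claim_equal_split_composite_tag := by
  intro tag allowed_tags _
  unfold Spec_split_composite_tag split_composite_tag split_composite_tag_alt
  rw [pvLoopA_eq_pvPartsB, filter_map_eq_filterMap]
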